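-- pv_equiv track=rewrite | github.com/ivanidknow/LLM_SecCodeReview | backend/app/api/projects.py | _expand_categories
-- ===== SOURCE A (Python) =====
-- _KNOWN_CATEGORIES: dict[str, str] = {
--     "discovery":                 "discovery",
--     "modeling":                  "modeling",
--     "deep_scan":                 "deep_scan",
--     "validation_and_reporting":  "validation_and_reporting",
--     "validating_and_reporting":  "validation_and_reporting",
-- }
--
-- def _expand_categories(selected_ids: list[str], tree: dict) -> tuple[list[str], list[str]]:
--     expanded_proto_ids: list[str] = []
--     expanded_categories: list[str] = []
--     individual_ids: list[str] = []
--
--     for sid in selected_ids: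
--         sid_n = sid.lower().strip()
--         if sid_n in _KNOWN_CATEGORIES:
--             target = _KNOWN_CATEGORIES[sid_n]
--             expanded_categories.append(sid)
--             # Match any tree_key that STARTS WITH the target directory
--             for tree_key, protocols in tree.items():
--                 normalized_key = tree_key.replace("\\", "/").lower()
--                 # Check if this node is exactly the target or a child of the target
--                 if normalized_key == target or normalized_key.startswith(f"{target}/"):
--                     for proto in protocols:
--                         pid = proto.get("id", "")
--                         if pid and pid not in expanded_proto_ids:
--                             expanded_proto_ids.append(pid)
--         else:
--             individual_ids.append(sid)
--
--     final = list(expanded_proto_ids)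
--     for rid in individual_ids:
--         if rid not in final:
--             final.append(rid)
--     return final, expanded_categories
-- ===== SOURCE B (Python) =====
-- _KNOWN_CATEGORIES: dict[str, str] = {
--     "discovery":                 "discovery",
--     "modeling":                  "modeling",
--     "deep_scan":                 "deep_scan",
--     "validation_and_reporting":  "validation_and_reporting",
--     "validating_and_reporting":  "validation_and_reporting",
-- }
--
-- _TARGETS = ("discovery", "modeling", "deep_scan", "validation_and_reporting")
--
--
-- def _matches(tree_key: str, target: str) -> bool:
--     nk = tree_key.replace("\\", "/").lower()
--     return nk == target or nk.startswith(target + "/")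
--
--
-- def _expand_categories(selected_ids: list[str], tree: dict) -> tuple[list[str], list[str]]:
--     # One pass per target over the tree builds an index target -> ordered protocol ids,
--     # so the selected_ids loop never rescans the tree; a shared seen-set keeps
--     # first-seen dedup order across categories and individuals.
--     index = {
--         t: [p.get("id", "") for key, protos in tree.items() if _matches(key, t)
--             for p in protos if p.get("id", "")]
--         for t in _TARGETS
--     }
--     result: list[str] = []
--     seen: set[str] = set()
--     expanded_categories: list[str] = []
--     individuals: list[str] = []
--     for sid in selected_ids:
--         target = _KNOWN_CATEGORIES.get(sid.lower().strip())
--         if target is None: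
--             individuals.append(sid)
--         else:
--             expanded_categories.append(sid)
--             for pid in index[target]:
--                 if pid not in seen:
--                     seen.add(pid)
--                     result.append(pid)
--     for iid in individuals:
--         if iid not in seen:
--             seen.add(iid)
--             result.append(iid)
--     return result, expanded_categories
-- ===== Notes on version B (the rewrite author's own statement) =====
-- stated objective: faster
-- what changed: B builds a target-to-protocol-id index in one pass per known target over the tree and dedups with a shared seen-set, instead of rescanning the whole tree and linearly scanning the output list for every selected category; individuals are deduped against the same seen-set.
import Mathlib
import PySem

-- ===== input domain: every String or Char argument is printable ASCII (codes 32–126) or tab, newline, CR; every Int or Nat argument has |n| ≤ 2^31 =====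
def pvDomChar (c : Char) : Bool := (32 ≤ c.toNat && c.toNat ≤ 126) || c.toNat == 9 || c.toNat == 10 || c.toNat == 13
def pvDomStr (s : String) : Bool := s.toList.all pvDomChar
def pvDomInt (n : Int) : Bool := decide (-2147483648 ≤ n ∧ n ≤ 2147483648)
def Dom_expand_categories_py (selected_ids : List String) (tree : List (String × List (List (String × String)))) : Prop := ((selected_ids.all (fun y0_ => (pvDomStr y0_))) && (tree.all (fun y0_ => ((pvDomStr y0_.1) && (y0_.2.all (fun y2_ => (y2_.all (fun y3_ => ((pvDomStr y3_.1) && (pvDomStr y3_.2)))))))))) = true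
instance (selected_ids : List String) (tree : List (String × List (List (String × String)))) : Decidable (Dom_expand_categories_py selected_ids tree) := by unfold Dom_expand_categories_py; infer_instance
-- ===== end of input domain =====

-- B builds a target→protocol-id index once and dedups with a seen-set, instead of
-- rescanning the whole tree and the output list for every selected category (objective: faster).

-- _KNOWN_CATEGORIES lookup: 'sid_n in _KNOWN_CATEGORIES' + '_KNOWN_CATEGORIES[sid_n]' (A) / '.get(sid_n)' (B)
def pvKCGet? (s : String) : Option String :=
  if s == "discovery" then some "discovery"
  else if s == "modeling" then some "modeling"
  else if s == "deep_scan" then some "deep_scan"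
  else if s == "validation_and_reporting" then some "validation_and_reporting"
  else if s == "validating_and_reporting" then some "validation_and_reporting"
  else none

-- proto.get("id", "") on the assoc list: first match, exact hand port of dict.get
def pvGetId : List (String × String) → String
  | [] => ""
  | (k, v) :: rest => if k == "id" then v else pvGetId rest

-- normalized_key == target or normalized_key.startswith(f"{target}/") (B's _matches; A computes it inline)
def pvMatch (tree_key target : String) : Bool :=
  let nk := PySem.Str.lower (PySem.Str.replace tree_key "\\" "/")
  nk == target || PySem.Str.startswith nk (target ++ "/")

-- ===== PORT A =====
-- the inner 'for tree_key, protocols in tree.items(): … for proto in protocols: …' rescan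
def pvAInner (target : String) (tree : List (String × List (List (String × String)))) (acc : List String) : List String :=
  tree.foldl (fun acc kv =>
    if pvMatch kv.1 target then
      kv.2.foldl (fun acc proto =>
        let pid := pvGetId proto
        if pid != "" && !acc.contains pid then acc ++ [pid] else acc) acc
    else acc) acc

-- the body of A's 'for sid in selected_ids' loop; state = (expanded_proto_ids, expanded_categories, individual_ids)
def pvStepA (tree : List (String × List (List (String × String))))
    (st : List String × List String × List String) (sid : String) :
    List String × List String × List String :=
  match pvKCGet? (PySem.Str.strip (PySem.Str.lower sid)) with
  | some target => (pvAInner target tree st.1, st.2.1 ++ [sid], st.2.2)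
  | none => (st.1, st.2.1, st.2.2 ++ [sid])

def expand_categories_py (selected_ids : List String) (tree : List (String × List (List (String × String)))) : List String × List String :=
  let st := selected_ids.foldl (pvStepA tree) ([], [], [])
  let final := st.2.2.foldl (fun f rid => if !f.contains rid then f ++ [rid] else f) st.1
  (final, st.2.1)

-- ===== PORT B =====
def pvTargets : List String := ["discovery", "modeling", "deep_scan", "validation_and_reporting"]

-- one index entry: [p.get("id","") for key, protos in tree.items() if _matches(key, t) for p in protos if p.get("id","")]
def pvIdsFor (tree : List (String × List (List (String × String)))) (t : String) : List String :=
  (tree.filter (fun kv => pvMatch kv.1 t)).flatMap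
    (fun kv => (kv.2.filter (fun p => pvGetId p != "")).map pvGetId)

-- index[t]: hand port of dict indexing on the index dict (t is always one of pvTargets when used)
def pvLookup : List (String × List String) → String → List String
  | [], _ => []
  | (k, v) :: rest, t => if k == t then v else pvLookup rest t

-- 'if pid not in seen: seen.add(pid); result.append(pid)'
def pvStepSeen (rs : List String × PySem.Set String) (pid : String) : List String × PySem.Set String :=
  if PySem.Set.contains rs.2 pid then rs else (rs.1 ++ [pid], PySem.Set.add rs.2 pid)

-- the body of B's 'for sid in selected_ids' loop; state = (result, seen, expanded_categories, individuals)
def pvStepB (index : List (String × List String))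
    (st : List String × PySem.Set String × List String × List String) (sid : String) :
    List String × PySem.Set String × List String × List String :=
  match pvKCGet? (PySem.Str.strip (PySem.Str.lower sid)) with
  | none => (st.1, st.2.1, st.2.2.1, st.2.2.2 ++ [sid])
  | some target =>
    let rs := (pvLookup index target).foldl pvStepSeen (st.1, st.2.1)
    (rs.1, rs.2, st.2.2.1 ++ [sid], st.2.2.2)

def expand_categories_py_alt (selected_ids : List String) (tree : List (String × List (List (String × String)))) : List String × List String :=
  let index := pvTargets.map (fun t => (t, pvIdsFor tree t))
  let st := selected_ids.foldl (pvStepB index) ([], PySem.Set.empty, [], [])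
  let rs := st.2.2.2.foldl pvStepSeen (st.1, st.2.1)
  (rs.1, st.2.2.1)

-- ===== PRECONDITION & SPEC =====
def Spec_expand_categories_py (selected_ids : List String) (tree : List (String × List (List (String × String)))) (out : List String × List String) : Prop := out = expand_categories_py_alt selected_ids tree
instance (selected_ids : List String) (tree : List (String × List (List (String × String)))) (out : List String × List String) : Decidable (Spec_expand_categories_py selected_ids tree out) := by unfold Spec_expand_categories_py; infer_instance

-- ===== CLAIM (what is proved, stated in full; the proofs are below) =====
def Claim_equal_expand_categories_py : Prop := ∀ (selected_ids : List String) (tree : List (String × List (List (String × String)))), Dom_expand_categories_py selected_ids tree → Spec_expand_categories_py selected_ids tree (expand_categories_py selected_ids tree)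

-- ===== LEMMAS AND PROOFS =====

-- dedup-append fold, the common denominator of both programs' dedup loops
def pvDedup (acc : List String) (xs : List String) : List String :=
  xs.foldl (fun a x => if a.contains x then a else a ++ [x]) acc

theorem pvDedup_append (acc xs ys : List String) :
    pvDedup acc (xs ++ ys) = pvDedup (pvDedup acc xs) ys := by
  simp [pvDedup, List.foldl_append]

-- B's seen-set fold, started with seen = set(result), is the dedup fold in both components
theorem pvStepSeen_fold (xs : List String) : ∀ P : List String,
    xs.foldl pvStepSeen (P, P) = (pvDedup P xs, pvDedup P xs) := by
  induction xs with
  | nil => intro P; rfl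
  | cons x xs ih =>
    intro P
    have hd : pvDedup P (x :: xs) = pvDedup (if P.contains x then P else P ++ [x]) xs := rfl
    rw [List.foldl_cons, hd]
    by_cases h : x ∈ P
    · have h1 : pvStepSeen (P, P) x = (P, P) := by
        simp [pvStepSeen, PySem.Set.contains_eq_listContains, h]
      rw [h1, if_pos (List.elem_eq_true_of_mem h), ih P]
    · have h1 : pvStepSeen (P, P) x = (P ++ [x], P ++ [x]) := by
        simp [pvStepSeen, PySem.Set.contains_eq_listContains, h, PySem.Set.add_of_not_mem]
      rw [h1, if_neg (fun hc => h (List.mem_of_elem_eq_true hc)), ih (P ++ [x])]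

-- A's protocol loop for one tree entry is the dedup fold over that entry's id list
theorem pvA_protos (protos : List (List (String × String))) : ∀ acc : List String,
    protos.foldl (fun acc proto =>
        let pid := pvGetId proto
        if pid != "" && !acc.contains pid then acc ++ [pid] else acc) acc
      = pvDedup acc ((protos.filter (fun p => pvGetId p != "")).map pvGetId) := by
  induction protos with
  | nil => intro acc; rfl
  | cons p ps ih =>
    intro acc
    rw [List.foldl_cons, List.filter_cons]
    by_cases h : pvGetId p = ""
    · have h2 : (pvGetId p != "") = false := by simp [h]
      simp only [h2, Bool.false_eq_true, if_false]
      exact ih acc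
    · have h2 : (pvGetId p != "") = true := by simp [h]
      rw [if_pos h2, List.map_cons]
      have hd : pvDedup acc (pvGetId p :: (ps.filter (fun p => pvGetId p != "")).map pvGetId)
          = pvDedup (if acc.contains (pvGetId p) then acc else acc ++ [pvGetId p])
              ((ps.filter (fun p => pvGetId p != "")).map pvGetId) := rfl
      rw [hd]
      by_cases hc : acc.contains (pvGetId p)
      · have h1 : (pvGetId p != "" && !acc.contains (pvGetId p)) = false := by
          rw [hc]; simp
        simp only [h1, Bool.false_eq_true, if_false, if_pos hc]
        exact ih acc
      · have h1 : (pvGetId p != "" && !acc.contains (pvGetId p)) = true := by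
          simp only [h2, Bool.true_and, Bool.not_eq_true']
          simpa using hc
        simp only [h1, if_true, if_neg hc]
        exact ih (acc ++ [pvGetId p])

-- A's tree rescan for a target is the dedup fold over B's index list for that target
theorem pvA_inner (target : String) (tree : List (String × List (List (String × String)))) :
    ∀ acc : List String, pvAInner target tree acc = pvDedup acc (pvIdsFor tree target) := by
  induction tree with
  | nil => intro acc; rfl
  | cons kv rest ih =>
    intro acc
    have hA : pvAInner target (kv :: rest) acc
        = pvAInner target rest (if pvMatch kv.1 target then
            kv.2.foldl (fun acc proto =>
              let pid := pvGetId proto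
              if pid != "" && !acc.contains pid then acc ++ [pid] else acc) acc
          else acc) := by simp only [pvAInner, List.foldl_cons]
    rw [hA]
    by_cases h : pvMatch kv.1 target
    · have hI : pvIdsFor (kv :: rest) target
          = ((kv.2.filter (fun p => pvGetId p != "")).map pvGetId) ++ pvIdsFor rest target := by
        simp [pvIdsFor, h]
      rw [if_pos h, ih, hI, pvDedup_append, pvA_protos]
    · have hI : pvIdsFor (kv :: rest) target = pvIdsFor rest target := by
        simp [pvIdsFor, h]
      rw [if_neg h, ih, hI]

-- the known-categories lookup only ever returns one of the four targets
theorem pvKC_mem {s t : String} (h : pvKCGet? s = some t) :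
    t = "discovery" ∨ t = "modeling" ∨ t = "deep_scan" ∨ t = "validation_and_reporting" := by
  unfold pvKCGet? at h
  split_ifs at h <;> simp_all

-- looking the returned target up in the index gives exactly its id list
theorem pvLookup_target {s t : String} (h : pvKCGet? s = some t)
    (tree : List (String × List (List (String × String)))) :
    pvLookup (pvTargets.map (fun t => (t, pvIdsFor tree t))) t = pvIdsFor tree t := by
  rcases pvKC_mem h with rfl | rfl | rfl | rfl <;> rfl

-- A's final individuals loop is the dedup fold
theorem pvA_final (I : List String) : ∀ P : List String,
    I.foldl (fun f rid => if !f.contains rid then f ++ [rid] else f) P = pvDedup P I := by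
  induction I with
  | nil => intro P; rfl
  | cons i is ih =>
    intro P
    have hd : pvDedup P (i :: is) = pvDedup (if P.contains i then P else P ++ [i]) is := rfl
    rw [List.foldl_cons, hd]
    cases hb : P.contains i with
    | true => rw [if_neg (by simp), if_pos rfl, ih P]
    | false => rw [if_pos (by decide), if_neg (by decide), ih (P ++ [i])]

-- main loop invariant: B's state is (A.protos, A.protos as the seen-set, A.cats, A.individuals)
theorem pvMain (tree : List (String × List (List (String × String)))) (sids : List String) :
    ∀ P C I : List String,
    sids.foldl (pvStepB (pvTargets.map (fun t => (t, pvIdsFor tree t)))) (P, P, C, I)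
      = ((sids.foldl (pvStepA tree) (P, C, I)).1, (sids.foldl (pvStepA tree) (P, C, I)).1,
         (sids.foldl (pvStepA tree) (P, C, I)).2.1, (sids.foldl (pvStepA tree) (P, C, I)).2.2) := by
  induction sids with
  | nil => intro P C I; rfl
  | cons sid rest ih =>
    intro P C I
    rw [List.foldl_cons, List.foldl_cons]
    cases h : pvKCGet? (PySem.Str.strip (PySem.Str.lower sid)) with
    | none =>
      have ha : pvStepA tree (P, C, I) sid = (P, C, I ++ [sid]) := by
        simp [pvStepA, h]
      have hb : pvStepB (pvTargets.map (fun t => (t, pvIdsFor tree t))) (P, P, C, I) sid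
          = (P, P, C, I ++ [sid]) := by
        simp [pvStepB, h]
      rw [ha, hb, ih P C (I ++ [sid])]
    | some target =>
      have ha : pvStepA tree (P, C, I) sid = (pvAInner target tree P, C ++ [sid], I) := by
        simp [pvStepA, h]
      have hb : pvStepB (pvTargets.map (fun t => (t, pvIdsFor tree t))) (P, P, C, I) sid
          = (pvDedup P (pvIdsFor tree target), pvDedup P (pvIdsFor tree target), C ++ [sid], I) := by
        simp only [pvStepB, h]
        rw [pvLookup_target h tree, pvStepSeen_fold]
      rw [ha, hb, pvA_inner, ih (pvDedup P (pvIdsFor tree target)) (C ++ [sid]) I]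

-- ===== VERDICT (by name: the statement is the Claim_ definition above) =====
theorem expand_categories_py_spec : Claim_equal_expand_categories_py := by
  intro selected_ids tree _
  show expand_categories_py selected_ids tree = expand_categories_py_alt selected_ids tree
  unfold expand_categories_py expand_categories_py_alt
  dsimp only
  have he : (PySem.Set.empty : PySem.Set String) = ([] : PySem.Set String) := rfl
  rw [he, pvMain tree selected_ids [] [] [], pvStepSeen_fold, pvA_final]
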